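-- pv_equiv track=rewrite | github.com/ywfan617/python- | pintia/第3章-14 字符串字母大小写转换.py | chartrans
-- ===== SOURCE A (Python) =====
-- def chartrans(strs):
--     res=""
--     for i in strs:
--         if "a"<=i<="z":
--             res+=i.upper()
--         elif "A"<=i<="Z":
--             res+=i.lower()
--         elif i=="#":
--              continue
--         else:
--             res+=i
--     return res
-- ===== SOURCE B (Python) =====
-- _LOWER = "abcdefghijklmnopqrstuvwxyz"
-- _TABLE = str.maketrans({**{c: c.upper() for c in _LOWER},
--                         **{c.upper(): c for c in _LOWER},
--                         "#": None})
--
-- def chartrans(strs):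
--     return strs.translate(_TABLE)
-- ===== Notes on version B (the rewrite author's own statement) =====
-- stated objective: idiomatic
-- what changed: Replaces the per-character if/elif chain with string concatenation by a precomputed str.maketrans table (lowercase->uppercase, uppercase->lowercase, '#'->deleted) applied via a single strs.translate call.
import Mathlib
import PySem

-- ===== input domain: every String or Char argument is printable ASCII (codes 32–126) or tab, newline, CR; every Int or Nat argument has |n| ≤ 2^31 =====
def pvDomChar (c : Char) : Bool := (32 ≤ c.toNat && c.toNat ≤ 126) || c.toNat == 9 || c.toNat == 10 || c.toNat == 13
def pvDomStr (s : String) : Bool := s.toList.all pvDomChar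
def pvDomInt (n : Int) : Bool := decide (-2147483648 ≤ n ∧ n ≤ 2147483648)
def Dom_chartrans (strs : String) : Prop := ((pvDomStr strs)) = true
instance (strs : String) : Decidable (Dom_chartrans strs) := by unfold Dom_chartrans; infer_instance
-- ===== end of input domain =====

-- B replaces A's per-character if/elif chain with a precomputed translation table
-- (lower↔upper, '#' deleted) applied in one table-driven pass (idiomatic, same cost).


-- ===== PORT A =====
-- the for-loop over the characters, accumulating res
def chartransLoop : List Char → String → String
  | [], res => res
  | i :: t, res =>
    if 'a' ≤ i ∧ i ≤ 'z' then chartransLoop t (res.push i.toUpper)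
    else if 'A' ≤ i ∧ i ≤ 'Z' then chartransLoop t (res.push i.toLower)
    else if i = '#' then chartransLoop t res
    else chartransLoop t (res.push i)

def chartrans (strs : String) : String := chartransLoop strs.toList ""

-- ===== PORT B =====
-- the maketrans table: each lowercase letter to its uppercase, each uppercase to its
-- lowercase, '#' to deletion (none); lookup = first match, as in the Python dict
def pvLower : List Char := "abcdefghijklmnopqrstuvwxyz".toList
def pvTable : List (Char × Option Char) :=
  (pvLower.map fun c => (c, some c.toUpper)) ++
  (pvLower.map fun c => (c.toUpper, some c)) ++ [('#', none)]

-- str.translate on one character: mapped chars are replaced, None deletes, unmapped kept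
def pvTranslate (c : Char) : List Char :=
  match pvTable.lookup c with
  | some (some d) => [d]
  | some none => []
  | none => [c]

def chartrans_alt (strs : String) : String := String.ofList (strs.toList.flatMap pvTranslate)

-- ===== PRECONDITION & SPEC =====
def Spec_chartrans (strs : String) (out : String) : Prop := out = chartrans_alt strs
instance (strs : String) (out : String) : Decidable (Spec_chartrans strs out) := by unfold Spec_chartrans; infer_instance

-- ===== CLAIM (what is proved, stated in full; the proofs are below) =====
def Claim_equal_chartrans : Prop := ∀ (strs : String), Dom_chartrans strs → Spec_chartrans strs (chartrans strs)

-- ===== LEMMAS AND PROOFS =====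
-- per-character contribution of A's loop body
def stepA (c : Char) : List Char :=
  if 'a' ≤ c ∧ c ≤ 'z' then [c.toUpper]
  else if 'A' ≤ c ∧ c ≤ 'Z' then [c.toLower]
  else if c = '#' then [] else [c]

theorem chartransLoop_toList (cs : List Char) (res : String) :
    (chartransLoop cs res).toList = res.toList ++ cs.flatMap stepA := by
  induction cs generalizing res with
  | nil => simp [chartransLoop]
  | cons i t ih =>
    simp only [chartransLoop, stepA, List.flatMap_cons]
    split_ifs with h1 h2 h3 <;> simp [ih]

set_option maxRecDepth 8192 in
theorem step_agree_small :
    ∀ n : Fin 128, pvTranslate (Char.ofNat n.val) = stepA (Char.ofNat n.val) := by decide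

theorem step_agree (c : Char) (h : pvDomChar c = true) : pvTranslate c = stepA c := by
  have hlt : c.toNat < 128 := by
    simp only [pvDomChar, Bool.or_eq_true, Bool.and_eq_true, decide_eq_true_eq,
      beq_iff_eq] at h
    rcases h with ((⟨_, h⟩ | h) | h) | h <;> omega
  have := step_agree_small ⟨c.toNat, hlt⟩
  simpa [Char.ofNat_toNat] using this

-- ===== VERDICT (by name: the statement is the Claim_ definition above) =====
theorem chartrans_spec : Claim_equal_chartrans := by
  intro strs hDom
  unfold Spec_chartrans chartrans chartrans_alt
  apply String.ext
  show (chartransLoop strs.toList "").toList = _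
  rw [chartransLoop_toList]
  simp only [String.toList_empty, List.nil_append, String.toList_ofList]
  refine (List.flatMap_congr ?_).symm
  intro c hc
  exact step_agree c (by
    have := hDom
    unfold Dom_chartrans pvDomStr at this
    exact List.all_eq_true.mp this c hc)
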